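-- pv_equiv track=rewrite | github.com/jramaswami/Binary_Search_Python | minimum_deletions_from_the_ends_for_equilibrium.py | solve
-- ===== SOURCE A (Python) =====
-- def solve(nums):
--     curr_sum = 0
--     prev_sums = dict()
--     soln = 0
--     for i, n in enumerate(nums):
--         if n:
--             curr_sum += 1
--         else:
--             curr_sum -= 1
--
--         if curr_sum == 0:
--             soln = max(soln, i + 1)
--
--         if curr_sum in prev_sums:
--             soln = max(soln, i - prev_sums[curr_sum])
--         else:
--             prev_sums[curr_sum] = i
--
--     return len(nums) - soln
-- ===== SOURCE B (Python) =====
-- def solve(nums):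
--     # Brute force: for every start index, scan right tracking the running balance
--     # and record the longest window with balance zero.  No dict, no prefix table.
--     n = len(nums)
--     best = 0
--     for i in range(n):
--         bal = 0
--         for j in range(i, n):
--             bal += 1 if nums[j] else -1
--             if bal == 0:
--                 best = max(best, j - i + 1)
--     return n - best
-- ===== Notes on version B (the rewrite author's own statement) =====
-- stated objective: simpler
-- what changed: A finds the longest balanced span in one pass via running prefix sums memoised in a first-occurrence dict; B drops the prefix-sum/dict idea entirely and brute-forces all start indices with a rescanned running balance (two nested loops, no auxiliary structure), trading A's O(n) time for plainer O(n^2) code.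
import Mathlib
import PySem

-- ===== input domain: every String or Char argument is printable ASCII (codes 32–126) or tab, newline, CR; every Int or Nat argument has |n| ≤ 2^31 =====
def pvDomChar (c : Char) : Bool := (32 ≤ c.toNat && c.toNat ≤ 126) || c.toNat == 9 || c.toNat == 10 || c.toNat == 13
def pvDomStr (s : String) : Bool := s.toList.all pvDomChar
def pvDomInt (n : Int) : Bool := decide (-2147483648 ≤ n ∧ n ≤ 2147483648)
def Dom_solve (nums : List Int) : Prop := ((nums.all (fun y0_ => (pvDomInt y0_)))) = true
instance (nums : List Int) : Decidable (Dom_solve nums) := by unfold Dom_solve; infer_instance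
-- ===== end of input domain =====

-- B replaces A's one-pass prefix-sum/first-occurrence-dict algorithm by a plain brute force
-- over all start indices with a rescanned running balance (no dict, no prefix table);
-- simpler code, O(n^2) instead of A's O(n); return values proved equal on all inputs.

-- ===== PORT A =====
def solve (nums : List Int) : Int :=
  let st := (PySem.List.enumerate nums).foldl
    (fun (st : Int × PySem.Dict Int Int × Int) (p : Int × Int) =>
      let c := st.1 + (if p.2 ≠ 0 then (1 : Int) else -1)
      let s1 := if c = 0 then max st.2.2 (p.1 + 1) else st.2.2
      match st.2.1.get? c with
      | some v => (c, st.2.1, max s1 (p.1 - v))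
      | none   => (c, st.2.1.insert c p.1, s1))
    ((0 : Int), (PySem.Dict.empty : PySem.Dict Int Int), (0 : Int))
  (nums.length : Int) - st.2.2

-- ===== PORT B =====
-- nums[j]: j always lies in range here, so pyGetD is exact (no IndexError possible).
def solve_alt (nums : List Int) : Int :=
  let n := (nums.length : Int)
  let best := (PySem.List.pyRange 0 n 1).foldl
    (fun best i =>
      ((PySem.List.pyRange i n 1).foldl
        (fun (st : Int × Int) j =>
          let bal := st.1 + (if PySem.List.pyGetD nums j 0 ≠ 0 then (1 : Int) else -1)
          (bal, if bal = 0 then max st.2 (j - i + 1) else st.2))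
        ((0 : Int), best)).2)
    (0 : Int)
  n - best

-- ===== PRECONDITION & SPEC =====
def Spec_solve (nums : List Int) (out : Int) : Prop := out = solve_alt nums
instance (nums : List Int) (out : Int) : Decidable (Spec_solve nums out) := by unfold Spec_solve; infer_instance

-- ===== CLAIM (what is proved, stated in full; the proofs are below) =====
def Claim_equal_solve : Prop := ∀ (nums : List Int), Dom_solve nums → Spec_solve nums (solve nums)

-- ===== LEMMAS AND PROOFS =====

def sgn (n : Int) : Int := if n ≠ 0 then 1 else -1

def ocast (o : Option Nat) : Option Int :=
  match o with
  | some k => some (k : Int)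
  | none => none

@[simp] theorem ocast_some (k : Nat) : ocast (some k) = some ((k : Int)) := rfl
@[simp] theorem ocast_none : ocast none = none := rfl

def stepA (st : Int × PySem.Dict Int Int × Int) (p : Int × Int) : Int × PySem.Dict Int Int × Int :=
  let c := st.1 + (if p.2 ≠ 0 then (1 : Int) else -1)
  let s1 := if c = 0 then max st.2.2 (p.1 + 1) else st.2.2
  match st.2.1.get? c with
  | some v => (c, st.2.1, max s1 (p.1 - v))
  | none   => (c, st.2.1.insert c p.1, s1)

def stA (l : List Int) : Int × PySem.Dict Int Int × Int :=
  (PySem.List.enumerate l).foldl stepA ((0 : Int), PySem.Dict.empty, (0 : Int))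

def Plist (l : List Int) : List Int := List.scanl (fun t n => t + sgn n) 0 l

def sumS (l : List Int) : Int := l.foldl (fun t n => t + sgn n) 0

def FIdx (Pl : List Int) (v : Int) : Int := (ocast (PySem.List.index? Pl v)).getD 0

def FVal (Pl : List Int) (j : Nat) : Int := (j : Int) - FIdx Pl (Pl.getD j 0)

def InvA (l : List Int) : Prop :=
  (stA l).1 = sumS l ∧
  (∀ v, (stA l).2.1.get? v = ocast (PySem.List.index? (Plist l).tail v)) ∧
  (∀ j, j < (Plist l).length → FVal (Plist l) j ≤ (stA l).2.2) ∧
  (∃ j, j < (Plist l).length ∧ (stA l).2.2 = FVal (Plist l) j)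

theorem solve_eq (nums : List Int) : solve nums = (nums.length : Int) - (stA nums).2.2 := by
  unfold solve stA stepA
  rfl

theorem scanl_head (f : Int → Int → Int) (b : Int) (l : List Int) :
    List.scanl f b l = b :: (List.scanl f b l).tail := by
  cases l with
  | nil => rfl
  | cons a t => rw [List.scanl_cons]; rfl

theorem Plist_cons_tail (l : List Int) : Plist l = 0 :: (Plist l).tail := by
  rw [Plist]; exact scanl_head _ 0 l

theorem length_Plist (l : List Int) : (Plist l).length = l.length + 1 := by
  simp [Plist, List.length_scanl]

theorem scanl_append_singleton (f : Int → Int → Int) (l : List Int) (x : Int) :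
    ∀ b, List.scanl f b (l ++ [x]) = List.scanl f b l ++ [f (l.foldl f b) x] := by
  induction l with
  | nil => intro b; rfl
  | cons a t ih =>
    intro b
    rw [List.cons_append, List.scanl_cons, ih, List.scanl_cons, List.foldl_cons]
    rfl

theorem Plist_append (l : List Int) (x : Int) :
    Plist (l ++ [x]) = Plist l ++ [sumS l + sgn x] := by
  simpa [Plist, sumS] using scanl_append_singleton (fun t n => t + sgn n) l x 0

theorem sumS_append (l : List Int) (x : Int) : sumS (l ++ [x]) = sumS l + sgn x := by
  simp [sumS]

theorem index?_append_singleton_of_ne {t : List Int} {c v : Int} (h : v ≠ c) :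
    PySem.List.index? (t ++ [c]) v = PySem.List.index? t v := by
  induction t with
  | nil =>
    rw [List.nil_append, PySem.List.index?_cons_of_ne _ (Ne.symm h)]
    rfl
  | cons a t ih =>
    by_cases hav : a = v
    · subst hav
      rw [List.cons_append, PySem.List.index?_cons_self, PySem.List.index?_cons_self]
    · rw [List.cons_append, PySem.List.index?_cons_of_ne _ hav,
        PySem.List.index?_cons_of_ne _ hav, ih]

theorem index?_first_le {xs : List Int} {v : Int} {k j : Nat} (hk : PySem.List.index? xs v = some k)
    (hj : j < xs.length) (hv : xs.getD j 0 = v) : k ≤ j := by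
  obtain ⟨hkl, hxk, hmin⟩ := PySem.List.getElem_of_index?_eq_some hk
  by_contra hlt
  rw [not_le] at hlt
  have := hmin j hlt
  rw [List.getD_eq_getElem xs 0 hj] at hv
  exact this hv

theorem FVal_nonneg {Pl : List Int} {j : Nat} (hj : j < Pl.length) : 0 ≤ FVal Pl j := by
  have hmem : Pl.getD j 0 ∈ Pl := by
    rw [List.getD_eq_getElem Pl 0 hj]; exact List.getElem_mem hj
  have hssome := (PySem.List.index?_isSome_iff Pl (Pl.getD j 0)).2 hmem
  obtain ⟨k, hk⟩ := Option.isSome_iff_exists.1 hssome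
  have hle : k ≤ j := index?_first_le hk hj rfl
  simp only [FVal, FIdx, hk, ocast_some, Option.getD_some]
  omega

theorem FVal_append {Pl : List Int} {c : Int} {j : Nat} (hj : j < Pl.length) :
    FVal (Pl ++ [c]) j = FVal Pl j := by
  have hget : (Pl ++ [c]).getD j 0 = Pl.getD j 0 := by
    rw [List.getD_eq_getElem _ 0 (by simp; omega), List.getD_eq_getElem Pl 0 hj,
      List.getElem_append_left hj]
  have hmem : Pl.getD j 0 ∈ Pl := by
    rw [List.getD_eq_getElem Pl 0 hj]; exact List.getElem_mem hj
  rw [FVal, FVal, hget, FIdx, FIdx, PySem.List.index?_append_of_mem _ hmem]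

theorem stA_append (l : List Int) (x : Int) :
    stA (l ++ [x]) = stepA (stA l) ((l.length : Int), x) := by
  rw [stA, PySem.List.enumerate_append, List.foldl_append, PySem.List.enumerate_cons,
    PySem.List.enumerate_nil, List.foldl_cons, List.foldl_nil, zero_add]
  rfl

theorem invA (l : List Int) : InvA l := by
  induction l using List.reverseRecOn with
  | nil =>
    refine ⟨rfl, ?_, ?_, ⟨0, by decide, by decide⟩⟩
    · intro v
      show PySem.Dict.get? PySem.Dict.empty v = _
      rw [PySem.Dict.get?_empty]
      rfl
    · intro j hj
      have hj0 : j = 0 := by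
        have := length_Plist ([] : List Int); simp at this; omega
      subst hj0; decide
  | append_singleton l x ih =>
    obtain ⟨hc, hd, hub, j0, hj0, hs⟩ := ih
    have hPl : Plist (l ++ [x]) = Plist l ++ [sumS l + sgn x] := Plist_append l x
    have htail : (Plist (l ++ [x])).tail = (Plist l).tail ++ [sumS l + sgn x] := by
      conv_lhs => rw [hPl, Plist_cons_tail l]
      rfl
    have hlen : (Plist l).length = l.length + 1 := length_Plist l
    have hlen' : (Plist (l ++ [x])).length = l.length + 2 := by
      rw [length_Plist]; simp
    have htlen : (Plist l).tail.length = l.length := by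
      have h0 := Plist_cons_tail l
      have h1 : (0 :: (Plist l).tail).length = l.length + 1 := by rw [← h0]; exact hlen
      simpa using h1
    have hsum : (stA l).1 + (if x ≠ 0 then (1 : Int) else -1) = sumS l + sgn x := by
      rw [hc, sgn]
    have hgetnew : (Plist (l ++ [x])).getD (l.length + 1) 0 = sumS l + sgn x := by
      rw [hPl, List.getD_eq_getElem _ 0 (by simp [hlen])]
      exact List.getElem_concat_length (by omega) _
    have hzero_head : Plist (l ++ [x]) = 0 :: ((Plist l).tail ++ [sumS l + sgn x]) := by
      rw [← htail]; exact Plist_cons_tail _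
    have hdc := hd (sumS l + sgn x)
    have hstep := stA_append l x
    have hFold : ∀ j, j < l.length + 1 → FVal (Plist (l ++ [x])) j = FVal (Plist l) j := by
      intro j hj
      rw [hPl]; exact FVal_append (by omega)
    cases hres : PySem.List.index? (Plist l).tail (sumS l + sgn x) with
    | some k =>
      have hkmem : (sumS l + sgn x) ∈ (Plist l).tail :=
        (PySem.List.index?_isSome_iff _ _).1 (by rw [hres]; rfl)
      have hget : (stA l).2.1.get? (sumS l + sgn x) = some ((k : Int)) := by
        rw [hdc, hres]; rfl
      have hkj : k ≤ l.length := by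
        obtain ⟨hkl, -, -⟩ := PySem.List.getElem_of_index?_eq_some hres
        omega
      have hst : stA (l ++ [x]) = (sumS l + sgn x, (stA l).2.1,
          max (if (sumS l + sgn x) = 0 then max (stA l).2.2 ((l.length : Int) + 1) else (stA l).2.2)
              ((l.length : Int) - (k : Int))) := by
        rw [hstep]
        simp only [stepA, hsum, hget]
      have hFnew : FVal (Plist (l ++ [x])) (l.length + 1) =
          if (sumS l + sgn x) = 0 then ((l.length : Int) + 1) else (l.length : Int) - (k : Int) := by
        by_cases hz : (sumS l + sgn x) = 0
        · rw [if_pos hz, FVal, hgetnew]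
          have hidx : PySem.List.index? (Plist (l ++ [x])) (sumS l + sgn x) = some 0 := by
            rw [hzero_head, hz]; exact PySem.List.index?_cons_self _ _
          rw [FIdx, hidx, ocast_some]
          simp only [Option.getD_some]
          omega
        · rw [if_neg hz, FVal, hgetnew]
          have hz0 : (0 : Int) ≠ sumS l + sgn x := fun h => hz h.symm
          have hidx : PySem.List.index? (Plist (l ++ [x])) (sumS l + sgn x) = some (k + 1) := by
            rw [hzero_head, PySem.List.index?_cons_of_ne _ hz0,
              PySem.List.index?_append_of_mem _ hkmem, hres]
            rfl
          rw [FIdx, hidx, ocast_some]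
          simp only [Option.getD_some]
          omega
      refine ⟨?_, ?_, ?_, ?_⟩
      · rw [hst, sumS_append]
      · intro v
        rw [hst, htail]
        show (stA l).2.1.get? v = _
        by_cases hv : v = (sumS l + sgn x)
        · subst hv
          rw [PySem.List.index?_append_of_mem _ hkmem, hres, hget]
          rfl
        · rw [index?_append_singleton_of_ne hv, hd v]
      · intro j hj
        rw [hlen'] at hj
        rcases Nat.lt_or_ge j (l.length + 1) with hjo | hjn
        · rw [hFold j hjo, hst]
          show FVal (Plist l) j ≤ max (if (sumS l + sgn x) = 0
              then max (stA l).2.2 ((l.length : Int) + 1) else (stA l).2.2)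
              ((l.length : Int) - (k : Int))
          have h1 := hub j (by omega)
          by_cases hz : (sumS l + sgn x) = 0
          · rw [if_pos hz]
            calc FVal (Plist l) j ≤ (stA l).2.2 := h1
              _ ≤ max (stA l).2.2 ((l.length : Int) + 1) := le_max_left _ _
              _ ≤ _ := le_max_left _ _
          · rw [if_neg hz]
            exact le_trans h1 (le_max_left _ _)
        · have hje : j = l.length + 1 := by omega
          subst hje
          rw [hFnew, hst]
          show (if (sumS l + sgn x) = 0 then ((l.length : Int) + 1)
              else (l.length : Int) - (k : Int)) ≤ max (if (sumS l + sgn x) = 0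
              then max (stA l).2.2 ((l.length : Int) + 1) else (stA l).2.2)
              ((l.length : Int) - (k : Int))
          by_cases hz : (sumS l + sgn x) = 0
          · rw [if_pos hz, if_pos hz]
            exact le_trans (le_max_right _ _) (le_max_left _ _)
          · rw [if_neg hz, if_neg hz]
            exact le_max_right _ _
      · rw [hst]
        by_cases hz : (sumS l + sgn x) = 0
        · rcases le_total (stA l).2.2 ((l.length : Int) + 1) with hcmp | hcmp
          · refine ⟨l.length + 1, by rw [hlen']; omega, ?_⟩
            show max (if (sumS l + sgn x) = 0
                then max (stA l).2.2 ((l.length : Int) + 1) else (stA l).2.2)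
                ((l.length : Int) - (k : Int)) = FVal (Plist (l ++ [x])) (l.length + 1)
            rw [hFnew, if_pos hz, if_pos hz, max_def, max_def]
            split_ifs <;> omega
          · refine ⟨j0, by rw [hlen']; omega, ?_⟩
            show max (if (sumS l + sgn x) = 0
                then max (stA l).2.2 ((l.length : Int) + 1) else (stA l).2.2)
                ((l.length : Int) - (k : Int)) = FVal (Plist (l ++ [x])) j0
            rw [hFold j0 (by omega), ← hs, if_pos hz]
            have hs0 : 0 ≤ (stA l).2.2 := by rw [hs]; exact FVal_nonneg hj0
            rw [max_def, max_def]
            split_ifs <;> omega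
        · rcases le_total (stA l).2.2 ((l.length : Int) - (k : Int)) with hcmp | hcmp
          · refine ⟨l.length + 1, by rw [hlen']; omega, ?_⟩
            show max (if (sumS l + sgn x) = 0
                then max (stA l).2.2 ((l.length : Int) + 1) else (stA l).2.2)
                ((l.length : Int) - (k : Int)) = FVal (Plist (l ++ [x])) (l.length + 1)
            rw [hFnew, if_neg hz, if_neg hz, max_def]
            split_ifs <;> omega
          · refine ⟨j0, by rw [hlen']; omega, ?_⟩
            show max (if (sumS l + sgn x) = 0
                then max (stA l).2.2 ((l.length : Int) + 1) else (stA l).2.2)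
                ((l.length : Int) - (k : Int)) = FVal (Plist (l ++ [x])) j0
            rw [hFold j0 (by omega), ← hs, if_neg hz, max_def]
            split_ifs <;> omega
    | none =>
      have hnmem : (sumS l + sgn x) ∉ (Plist l).tail :=
        (PySem.List.index?_eq_none_iff _ _).1 hres
      have hget : (stA l).2.1.get? (sumS l + sgn x) = none := by
        rw [hdc, hres]; rfl
      have hst : stA (l ++ [x]) = (sumS l + sgn x,
          (stA l).2.1.insert (sumS l + sgn x) ((l.length : Int)),
          if (sumS l + sgn x) = 0 then max (stA l).2.2 ((l.length : Int) + 1) else (stA l).2.2) := by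
        rw [hstep]
        simp only [stepA, hsum, hget]
      have hFnew : FVal (Plist (l ++ [x])) (l.length + 1) =
          if (sumS l + sgn x) = 0 then ((l.length : Int) + 1) else 0 := by
        by_cases hz : (sumS l + sgn x) = 0
        · rw [if_pos hz, FVal, hgetnew]
          have hidx : PySem.List.index? (Plist (l ++ [x])) (sumS l + sgn x) = some 0 := by
            rw [hzero_head, hz]; exact PySem.List.index?_cons_self _ _
          rw [FIdx, hidx, ocast_some]
          simp only [Option.getD_some]
          omega
        · rw [if_neg hz, FVal, hgetnew]
          have hz0 : (0 : Int) ≠ sumS l + sgn x := fun h => hz h.symm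
          have hidx : PySem.List.index? (Plist (l ++ [x])) (sumS l + sgn x)
              = some (l.length + 1) := by
            rw [hzero_head, PySem.List.index?_cons_of_ne _ hz0,
              PySem.List.index?_append_singleton_self _ _ hnmem, htlen]
            rfl
          rw [FIdx, hidx, ocast_some]
          simp only [Option.getD_some]
          omega
      have hs0 : 0 ≤ (stA l).2.2 := by rw [hs]; exact FVal_nonneg hj0
      refine ⟨?_, ?_, ?_, ?_⟩
      · rw [hst, sumS_append]
      · intro v
        rw [hst, htail]
        show ((stA l).2.1.insert (sumS l + sgn x) ((l.length : Int))).get? v = _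
        by_cases hv : v = (sumS l + sgn x)
        · subst hv
          rw [PySem.Dict.get?_insert_self,
            PySem.List.index?_append_singleton_self _ _ hnmem, htlen]
          rfl
        · rw [PySem.Dict.get?_insert_of_ne _ _ hv, index?_append_singleton_of_ne hv, hd v]
      · intro j hj
        rw [hlen'] at hj
        rcases Nat.lt_or_ge j (l.length + 1) with hjo | hjn
        · rw [hFold j hjo, hst]
          show FVal (Plist l) j ≤ if (sumS l + sgn x) = 0
              then max (stA l).2.2 ((l.length : Int) + 1) else (stA l).2.2
          have h1 := hub j (by omega)
          by_cases hz : (sumS l + sgn x) = 0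
          · rw [if_pos hz]; exact le_trans h1 (le_max_left _ _)
          · rw [if_neg hz]; exact h1
        · have hje : j = l.length + 1 := by omega
          subst hje
          rw [hFnew, hst]
          show (if (sumS l + sgn x) = 0 then ((l.length : Int) + 1) else 0)
              ≤ if (sumS l + sgn x) = 0
              then max (stA l).2.2 ((l.length : Int) + 1) else (stA l).2.2
          by_cases hz : (sumS l + sgn x) = 0
          · rw [if_pos hz, if_pos hz]; exact le_max_right _ _
          · rw [if_neg hz, if_neg hz]; exact hs0
      · rw [hst]
        by_cases hz : (sumS l + sgn x) = 0
        · rcases le_total (stA l).2.2 ((l.length : Int) + 1) with hcmp | hcmp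
          · refine ⟨l.length + 1, by rw [hlen']; omega, ?_⟩
            show (if (sumS l + sgn x) = 0
                then max (stA l).2.2 ((l.length : Int) + 1) else (stA l).2.2)
                = FVal (Plist (l ++ [x])) (l.length + 1)
            rw [hFnew, if_pos hz, if_pos hz, max_def]
            split_ifs <;> omega
          · refine ⟨j0, by rw [hlen']; omega, ?_⟩
            show (if (sumS l + sgn x) = 0
                then max (stA l).2.2 ((l.length : Int) + 1) else (stA l).2.2)
                = FVal (Plist (l ++ [x])) j0
            rw [hFold j0 (by omega), ← hs, if_pos hz, max_def]
            split_ifs <;> omega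
        · refine ⟨j0, by rw [hlen']; omega, ?_⟩
          show (if (sumS l + sgn x) = 0
              then max (stA l).2.2 ((l.length : Int) + 1) else (stA l).2.2)
              = FVal (Plist (l ++ [x])) j0
          rw [hFold j0 (by omega), ← hs, if_neg hz]

-- ===== B-side lemmas =====

def innerF (nums : List Int) (i : Int) (st : Int × Int) (j : Int) : Int × Int :=
  let bal := st.1 + (if PySem.List.pyGetD nums j 0 ≠ 0 then (1 : Int) else -1)
  (bal, if bal = 0 then max st.2 (j - i + 1) else st.2)

def innerR (nums : List Int) (i : Nat) (b : Int) (m : Nat) : Int × Int :=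
  (PySem.List.pyRange (i : Int) (m : Int) 1).foldl (innerF nums (i : Int)) ((0 : Int), b)

def outerB (nums : List Int) (m : Nat) : Int :=
  (PySem.List.pyRange 0 (m : Int) 1).foldl
    (fun best i =>
      ((PySem.List.pyRange i (nums.length : Int) 1).foldl (innerF nums i) ((0 : Int), best)).2)
    (0 : Int)

def PP (nums : List Int) (j : Nat) : Int := (Plist nums).getD j 0

theorem solve_alt_eq (nums : List Int) :
    solve_alt nums = (nums.length : Int) - outerB nums nums.length := rfl

theorem foldl_sgn_shift (l : List Int) : ∀ c : Int,
    l.foldl (fun t n => t + sgn n) c = c + sumS l := by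
  induction l with
  | nil => intro c; simp [sumS]
  | cons a t ih =>
    intro c
    simp only [List.foldl_cons, sumS] at *
    rw [ih (c + sgn a), ih (0 + sgn a)]
    ring

theorem scanl_sgn_getD : ∀ (l : List Int) (b : Int) (j : Nat), j ≤ l.length →
    (List.scanl (fun u n => u + sgn n) b l).getD j 0 = b + sumS (l.take j) := by
  intro l
  induction l with
  | nil =>
    intro b j h
    have hj : j = 0 := Nat.le_zero.mp h
    subst hj
    simp [sumS]
  | cons a t ih =>
    intro b j h
    cases j with
    | zero => simp [sumS]
    | succ j =>
      rw [List.scanl_cons, List.getD_cons_succ, ih (b + sgn a) j (by simpa using h),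
        List.take_succ_cons]
      have hs : sumS (a :: t.take j) = sgn a + sumS (t.take j) := by
        show List.foldl (fun t n => t + sgn n) 0 (a :: t.take j) = _
        rw [List.foldl_cons, foldl_sgn_shift]
        ring
      rw [hs]
      ring

theorem getD_PP (nums : List Int) (j : Nat) (h : j ≤ nums.length) :
    PP nums j = sumS (nums.take j) := by
  unfold PP Plist
  rw [scanl_sgn_getD nums 0 j h]
  ring

theorem PP_succ (nums : List Int) {m : Nat} (h : m < nums.length) :
    PP nums (m + 1) = PP nums m + sgn (nums.getD m 0) := by
  rw [getD_PP nums (m + 1) (by omega), getD_PP nums m (le_of_lt h),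
    List.take_add_one, List.getElem?_eq_getElem h]
  rw [show ((some nums[m]).toList) = [nums[m]] from rfl, sumS_append,
    List.getD_eq_getElem nums 0 h]

theorem innerR_self (nums : List Int) (i : Nat) (b : Int) :
    innerR nums i b i = ((0 : Int), b) := by
  unfold innerR
  rw [PySem.List.pyRange_one_eq_nil (le_refl _)]
  rfl

theorem innerR_succ (nums : List Int) (i : Nat) (b : Int) (m : Nat) (h : i ≤ m) :
    innerR nums i b (m + 1) = innerF nums (i : Int) (innerR nums i b m) (m : Int) := by
  unfold innerR
  rw [show ((m + 1 : Nat) : Int) = (m : Int) + 1 by push_cast; ring,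
    PySem.List.pyRange_one_succ_right (by exact_mod_cast h), List.foldl_append,
    List.foldl_cons, List.foldl_nil]

theorem inner_inv (nums : List Int) (i : Nat) (b : Int) :
    ∀ m : Nat, i ≤ m → m ≤ nums.length →
      (innerR nums i b m).1 = PP nums m - PP nums i ∧
      b ≤ (innerR nums i b m).2 ∧
      ((innerR nums i b m).2 = b ∨ ∃ k : Nat, i < k ∧ k ≤ m ∧ PP nums k = PP nums i ∧
        (innerR nums i b m).2 = (k : Int) - (i : Int)) ∧
      (∀ k : Nat, i < k → k ≤ m → PP nums k = PP nums i →
        (k : Int) - (i : Int) ≤ (innerR nums i b m).2) := by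
  intro m
  induction m with
  | zero =>
    intro hi hm
    have h0 : i = 0 := Nat.le_zero.mp hi
    subst h0
    rw [innerR_self]
    exact ⟨by omega, le_refl _, Or.inl rfl, by intro k h1 h2 _; omega⟩
  | succ m ih =>
    intro hi hm
    rcases Nat.eq_or_lt_of_le hi with he | hlt
    · rw [← he, innerR_self]
      exact ⟨by omega, le_refl _, Or.inl rfl, by intro k h1 h2 _; omega⟩
    · have hile : i ≤ m := by omega
      have hmn : m < nums.length := by omega
      obtain ⟨h1, h2, h3, h4⟩ := ih hile (by omega)
      rw [innerR_succ nums i b m hile]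
      have hg : PySem.List.pyGetD nums (m : Int) 0 = nums.getD m 0 :=
        PySem.List.pyGetD_natCast nums m 0
      have hF : innerF nums (i : Int) (innerR nums i b m) (m : Int) =
          ((innerR nums i b m).1 + sgn (nums.getD m 0),
           if (innerR nums i b m).1 + sgn (nums.getD m 0) = 0
           then max (innerR nums i b m).2 ((m : Int) - (i : Int) + 1)
           else (innerR nums i b m).2) := by
        simp only [innerF, hg, sgn]
        rfl
      rw [hF]
      have hPs : PP nums (m + 1) = PP nums m + sgn (nums.getD m 0) := PP_succ nums hmn
      have hbal : (innerR nums i b m).1 + sgn (nums.getD m 0) = PP nums (m + 1) - PP nums i := by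
        rw [h1]; omega
      by_cases hz : PP nums (m + 1) = PP nums i
      · have hbz : (innerR nums i b m).1 + sgn (nums.getD m 0) = 0 := by omega
        rw [if_pos hbz]
        refine ⟨hbal, le_trans h2 (le_max_left _ _), ?_, ?_⟩
        · rcases le_total (innerR nums i b m).2 ((m : Int) - (i : Int) + 1) with hc | hc
          · exact Or.inr ⟨m + 1, by omega, le_refl _, hz, by rw [max_eq_right hc]; push_cast; ring⟩
          · rw [max_eq_left hc]
            rcases h3 with h3 | ⟨k, hk1, hk2, hk3, hk4⟩
            · exact Or.inl h3
            · exact Or.inr ⟨k, hk1, by omega, hk3, hk4⟩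
        · intro k hk1 hk2 hk3
          rcases Nat.lt_or_ge k (m + 1) with hkm | hkm
          · exact le_trans (h4 k hk1 (by omega) hk3) (le_max_left _ _)
          · have hke : k = m + 1 := by omega
            subst hke
            have : ((m + 1 : Nat) : Int) - (i : Int) ≤ (m : Int) - (i : Int) + 1 := by
              push_cast; omega
            exact le_trans this (le_max_right _ _)
      · have hbz : ¬ ((innerR nums i b m).1 + sgn (nums.getD m 0) = 0) := by omega
        rw [if_neg hbz]
        refine ⟨hbal, h2, ?_, ?_⟩
        · rcases h3 with h3 | ⟨k, hk1, hk2, hk3, hk4⟩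
          · exact Or.inl h3
          · exact Or.inr ⟨k, hk1, by omega, hk3, hk4⟩
        · intro k hk1 hk2 hk3
          rcases Nat.lt_or_ge k (m + 1) with hkm | hkm
          · exact h4 k hk1 (by omega) hk3
          · have hke : k = m + 1 := by omega
            subst hke
            exact absurd hk3 hz

theorem outerB_succ (nums : List Int) (m : Nat) :
    outerB nums (m + 1) = (innerR nums m (outerB nums m) nums.length).2 := by
  unfold outerB innerR
  rw [show ((m + 1 : Nat) : Int) = (m : Int) + 1 by push_cast; ring,
    PySem.List.pyRange_one_succ_right (by positivity), List.foldl_append,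
    List.foldl_cons, List.foldl_nil]

theorem outer_inv (nums : List Int) :
    ∀ m : Nat, m ≤ nums.length →
      0 ≤ outerB nums m ∧
      (outerB nums m = 0 ∨ ∃ i k : Nat, i < k ∧ k ≤ nums.length ∧ PP nums k = PP nums i ∧
        outerB nums m = (k : Int) - (i : Int)) ∧
      (∀ i k : Nat, i < m → i < k → k ≤ nums.length → PP nums k = PP nums i →
        (k : Int) - (i : Int) ≤ outerB nums m) := by
  intro m
  induction m with
  | zero =>
    intro _
    have h0 : outerB nums 0 = 0 := by
      unfold outerB
      rw [show ((0 : Nat) : Int) = 0 from rfl, PySem.List.pyRange_one_eq_nil (le_refl _)]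
      rfl
    exact ⟨by omega, Or.inl h0, by intro i k h1 _ _ _; omega⟩
  | succ m ih =>
    intro hm
    obtain ⟨ih0, ihm, ihs⟩ := ih (by omega)
    obtain ⟨-, h2, h3, h4⟩ := inner_inv nums m (outerB nums m) nums.length (by omega) (le_refl _)
    rw [outerB_succ]
    refine ⟨le_trans ih0 h2, ?_, ?_⟩
    · rcases h3 with h3 | ⟨k, hk1, hk2, hk3, hk4⟩
      · rw [h3]
        exact ihm
      · exact Or.inr ⟨m, k, hk1, hk2, hk3, hk4⟩
    · intro i k hi hik hk hP
      rcases Nat.lt_or_ge i m with him | him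
      · exact le_trans (ihs i k him hik hk hP) h2
      · have hie : i = m := by omega
        subst hie
        exact h4 k hik hk hP

theorem FVal_zero (nums : List Int) : FVal (Plist nums) 0 = 0 := by
  have h := Plist_cons_tail nums
  rw [FVal, show (Plist nums).getD 0 0 = 0 by rw [h]; rfl, FIdx,
    show PySem.List.index? (Plist nums) 0 = some 0 by rw [h]; exact PySem.List.index?_cons_self _ _]
  simp

theorem FVal_pair_le (nums : List Int) {i k : Nat} (hik : i < k) (hk : k < (Plist nums).length)
    (hP : PP nums k = PP nums i) : (k : Int) - (i : Int) ≤ FVal (Plist nums) k := by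
  have hmem : (Plist nums).getD k 0 ∈ Plist nums := by
    rw [List.getD_eq_getElem _ 0 hk]; exact List.getElem_mem hk
  obtain ⟨f, hf⟩ := Option.isSome_iff_exists.1 ((PySem.List.index?_isSome_iff _ _).2 hmem)
  have hfi : f ≤ i := index?_first_le hf (by omega) (by exact hP.symm)
  rw [FVal, FIdx, hf]
  simp only [ocast_some, Option.getD_some]
  omega

theorem FVal_sup (nums : List Int) (j : Nat) (hj : j < (Plist nums).length) :
    FVal (Plist nums) j ≤ outerB nums nums.length := by
  obtain ⟨hB0, -, hBsup⟩ := outer_inv nums nums.length (le_refl _)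
  have hmem : (Plist nums).getD j 0 ∈ Plist nums := by
    rw [List.getD_eq_getElem _ 0 hj]; exact List.getElem_mem hj
  obtain ⟨f, hf⟩ := Option.isSome_iff_exists.1 ((PySem.List.index?_isSome_iff _ _).2 hmem)
  have hfj : f ≤ j := index?_first_le hf hj rfl
  rw [FVal, FIdx, hf]
  simp only [ocast_some, Option.getD_some]
  rcases Nat.eq_or_lt_of_le hfj with he | hlt
  · rw [he]; omega
  · have hjn : j ≤ nums.length := by have := length_Plist nums; omega
    have hPfj : PP nums j = PP nums f := by
      obtain ⟨hfl, hfv, -⟩ := PySem.List.getElem_of_index?_eq_some hf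
      unfold PP
      rw [List.getD_eq_getElem _ 0 hfl] at *
      exact hfv.symm
    exact hBsup f j (by omega) hlt hjn hPfj

theorem FVal_attained (nums : List Int) :
    ∃ j, j < (Plist nums).length ∧ outerB nums nums.length = FVal (Plist nums) j := by
  obtain ⟨hB0, hmemb, -⟩ := outer_inv nums nums.length (le_refl _)
  rcases hmemb with h0 | ⟨i, k, hik, hk, hP, hBe⟩
  · exact ⟨0, by rw [length_Plist]; omega, by rw [h0, FVal_zero]⟩
  · have hkl : k < (Plist nums).length := by rw [length_Plist]; omega
    have h1 : (k : Int) - (i : Int) ≤ FVal (Plist nums) k := FVal_pair_le nums hik hkl hP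
    have h2 : FVal (Plist nums) k ≤ outerB nums nums.length := FVal_sup nums k hkl
    exact ⟨k, hkl, by omega⟩

-- ===== VERDICT (by name: the statement is the Claim_ definition above) =====
theorem solve_spec : Claim_equal_solve := by
  intro nums _
  show solve nums = solve_alt nums
  rw [solve_eq, solve_alt_eq]
  obtain ⟨-, -, hub, j0, hj0, hs⟩ := invA nums
  obtain ⟨j1, hj1, hB⟩ := FVal_attained nums
  have h1 : (stA nums).2.2 ≤ outerB nums nums.length := by rw [hs]; exact FVal_sup nums j0 hj0
  have h2 : outerB nums nums.length ≤ (stA nums).2.2 := by rw [hB]; exact hub j1 hj1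
  omega
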